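-- pv_equiv track=rewrite | github.com/keithwissing/adventofcode | 2023/day13.py | parse
-- ===== SOURCE A (Python) =====
-- def parse(lines):
--     patterns = [[]]
--     i = 0
--     for line in lines:
--         if not line:
--             i += 1
--             patterns.append([])
--         else:
--             patterns[i].append([c for c in line])
--     return patterns
-- ===== SOURCE B (Python) =====
-- def parse(lines):
--     blanks = [i for i, line in enumerate(lines) if not line]
--     boundaries = [-1] + blanks + [len(lines)]
--     return [[list(line) for line in lines[a + 1:b]]
--             for a, b in zip(boundaries, boundaries[1:])]
-- ===== Notes on version B (the rewrite author's own statement) =====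
-- stated objective: alternative
-- what changed: Replaces A's single counter-indexed scan that appends into patterns[i] with a two-pass form: first collect the indices of blank lines, then build each group from the slice between consecutive boundaries.
import Mathlib
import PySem

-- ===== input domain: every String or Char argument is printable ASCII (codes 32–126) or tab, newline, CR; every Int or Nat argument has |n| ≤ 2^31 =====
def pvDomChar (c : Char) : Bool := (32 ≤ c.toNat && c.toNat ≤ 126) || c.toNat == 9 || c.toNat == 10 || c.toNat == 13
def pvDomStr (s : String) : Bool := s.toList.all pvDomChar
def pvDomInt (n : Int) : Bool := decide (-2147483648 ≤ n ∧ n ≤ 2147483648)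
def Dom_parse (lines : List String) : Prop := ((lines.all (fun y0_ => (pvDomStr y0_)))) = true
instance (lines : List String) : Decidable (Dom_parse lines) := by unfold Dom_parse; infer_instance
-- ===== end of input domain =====

-- B replaces A's counter-indexed single scan by a two-pass form (collect blank-line indices, then build each group from a slice); objective: alternative decomposition, same cost.

-- [c for c in line]
def pvRow (line : String) : List String := line.toList.map (fun c => String.singleton c)

-- ===== PORT A =====
-- state: (patterns, i); 'not line' on a str is the empty-string test
def parse (lines : List String) : List (List (List String)) :=
  (lines.foldl
    (fun st line =>
      if line = "" then (st.1 ++ [([] : List (List String))], st.2 + 1)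
      else (st.1.modify st.2 (fun g => g ++ [pvRow line]), st.2))
    (([([] : List (List String))]), 0)).1

-- ===== PORT B =====
def parse_alt (lines : List String) : List (List (List String)) :=
  let blanks : List Int :=
    (PySem.List.enumerate lines 0).filterMap (fun p => if p.2 = "" then some p.1 else none)
  let boundaries : List Int := -1 :: blanks ++ [(lines.length : Int)]
  (boundaries.zip boundaries.tail).map
    (fun p => (PySem.List.slice lines (some (p.1 + 1)) (some p.2)).map pvRow)

-- ===== PRECONDITION & SPEC =====
def Spec_parse (lines : List String) (out : List (List (List String))) : Prop := out = parse_alt lines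
instance (lines : List String) (out : List (List (List String))) : Decidable (Spec_parse lines out) := by unfold Spec_parse; infer_instance

-- ===== CLAIM (what is proved, stated in full; the proofs are below) =====
def Claim_equal_parse : Prop := ∀ (lines : List String), Dom_parse lines → Spec_parse lines (parse lines)

-- ===== LEMMAS AND PROOFS =====

-- reference recursion both ports are reduced to
def pvSplit : List String → List (List (List String))
  | [] => [[]]
  | l :: ls =>
    if l = "" then [] :: pvSplit ls
    else
      match pvSplit ls with
      | [] => []
      | g :: gs => (pvRow l :: g) :: gs

theorem pvSplit_ne_nil (ls : List String) : pvSplit ls ≠ [] := by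
  induction ls with
  | nil => simp [pvSplit]
  | cons l ls ih =>
    simp only [pvSplit]
    split_ifs
    · simp
    · rcases h : pvSplit ls with _ | ⟨g, gs⟩
      · exact absurd h ih
      · simp

theorem modify_append_singleton {α : Type} (ps : List α) (g : α) (f : α → α) :
    (ps ++ [g]).modify ps.length f = ps ++ [f g] := by
  induction ps with
  | nil => simp [List.modify]
  | cons p ps ih => simpa [List.modify] using ih

-- A's loop invariant
theorem parse_fold (ls : List String) : ∀ (ps : List (List (List String))) (g : List (List String)),
    (ls.foldl
      (fun st line =>
        if line = "" then (st.1 ++ [([] : List (List String))], st.2 + 1)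
        else (st.1.modify st.2 (fun h => h ++ [pvRow line]), st.2))
      (ps ++ [g], ps.length)).1
    = ps ++ (pvSplit ls).modifyHead (fun h => g ++ h) := by
  induction ls with
  | nil => intro ps g; simp [pvSplit]
  | cons l ls ih =>
    intro ps g
    by_cases hl : l = ""
    · have h1 : ps ++ [g] ++ [([] : List (List String))] = (ps ++ [g]) ++ [([] : List (List String))] := by simp
      have h2 : ps.length + 1 = (ps ++ [g]).length := by simp
      simp only [List.foldl_cons, if_pos hl, h2, ih (ps ++ [g]) []]
      cases h : pvSplit ls <;> simp [pvSplit, hl, h, List.modifyHead]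
    · simp only [List.foldl_cons, if_neg hl, modify_append_singleton, ih ps (g ++ [pvRow l])]
      rcases h : pvSplit ls with _ | ⟨g0, gs⟩
      · exact absurd h (pvSplit_ne_nil ls)
      · simp [pvSplit, hl, h, List.modifyHead]

theorem parse_eq_pvSplit (ls : List String) : parse ls = pvSplit ls := by
  have h := parse_fold ls [] []
  simp only [List.nil_append, List.length_nil] at h
  rw [parse, h]
  cases pvSplit ls <;> simp [List.modifyHead]

-- blanks with shifted start
theorem blanks_shift (ls : List String) (s : Int) :
    (PySem.List.enumerate ls (s + 1)).filterMap (fun p => if p.2 = "" then some p.1 else none)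
    = ((PySem.List.enumerate ls s).filterMap (fun p => if p.2 = "" then some p.1 else none)).map (· + 1) := by
  induction ls generalizing s with
  | nil => simp [PySem.List.enumerate_nil]
  | cons l ls ih =>
    simp only [PySem.List.enumerate_cons, List.filterMap_cons]
    split_ifs
    · simp [ih (s + 1)]
    · exact ih (s + 1)

theorem blanks_nonneg (ls : List String) (s : Int) (hs : 0 ≤ s) :
    ∀ x ∈ (PySem.List.enumerate ls s).filterMap (fun p => if p.2 = "" then some p.1 else none), 0 ≤ x := by
  induction ls generalizing s with
  | nil => simp [PySem.List.enumerate_nil]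
  | cons l ls ih =>
    simp only [PySem.List.enumerate_cons, List.filterMap_cons]
    split_ifs
    · intro x hx
      rcases List.mem_cons.mp hx with h | h
      · omega
      · exact ih (s + 1) (by omega) x h
    · exact ih (s + 1) (by omega)

theorem slice_shift {α : Type} (x : α) (xs : List α) (a b : Int) (ha : 0 ≤ a) (hb : 0 ≤ b) :
    PySem.List.slice (x :: xs) (some (a + 1)) (some (b + 1)) = PySem.List.slice xs (some a) (some b) := by
  rw [PySem.List.slice_toNat (x :: xs) (by omega) (by omega), PySem.List.slice_toNat xs ha hb]
  have h1 : (a + 1).toNat = a.toNat + 1 := by omega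
  have h2 : (b + 1).toNat = b.toNat + 1 := by omega
  simp [h1, h2]

theorem slice_head {α : Type} (x : α) (xs : List α) (b : Int) (hb : 0 ≤ b) :
    PySem.List.slice (x :: xs) (some 0) (some (b + 1)) = x :: PySem.List.slice xs (some 0) (some b) := by
  rw [PySem.List.slice_toNat (x :: xs) (by omega) (by omega), PySem.List.slice_toNat xs (by omega) hb]
  have h2 : (b + 1).toNat = b.toNat + 1 := by omega
  simp [h2]


-- abbreviations for B's two passes (proof-only)
def pvBl (ls : List String) : List Int :=
  (PySem.List.enumerate ls 0).filterMap (fun p => if p.2 = "" then some p.1 else none)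

def pvBds (ls : List String) : List Int := -1 :: pvBl ls ++ [(ls.length : Int)]

def pvGps (ls : List String) (bds : List Int) : List (List (List String)) :=
  (bds.zip bds.tail).map
    (fun p => (PySem.List.slice ls (some (p.1 + 1)) (some p.2)).map pvRow)

theorem parse_alt_def (ls : List String) : parse_alt ls = pvGps ls (pvBds ls) := rfl

theorem pvBds_mem (ls : List String) : ∀ a ∈ pvBds ls, -1 ≤ a := by
  intro a ha
  rcases List.mem_cons.mp ha with h | h
  · omega
  · rcases List.mem_append.mp h with h | h
    · have := blanks_nonneg ls 0 le_rfl a h; omega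
    · simp only [List.mem_singleton] at h; omega

theorem pvBds_tail_mem (ls : List String) : ∀ b ∈ (pvBds ls).tail, 0 ≤ b := by
  intro b hb
  simp only [pvBds] at hb
  rcases List.mem_append.mp hb with h | h
  · exact blanks_nonneg ls 0 le_rfl b h
  · simp only [List.mem_singleton] at h; omega

-- shifting every boundary by one and prepending a line leaves every group unchanged
theorem gps_shift (x : String) (xs : List String) (bds : List Int)
    (h1 : ∀ a ∈ bds, -1 ≤ a) (h2 : ∀ b ∈ bds.tail, 0 ≤ b) :
    ((bds.map (· + 1)).zip (bds.map (· + 1)).tail).map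
      (fun p => (PySem.List.slice (x :: xs) (some (p.1 + 1)) (some p.2)).map pvRow)
    = pvGps xs bds := by
  have ht : (bds.map (· + 1)).tail = bds.tail.map (· + 1) := by
    cases bds <;> simp
  rw [pvGps, ht, List.zip_map, List.map_map]
  apply List.map_congr_left
  intro p hp
  obtain ⟨hp1, hp2⟩ := List.of_mem_zip hp
  have ha : -1 ≤ p.1 := h1 p.1 hp1
  have hb : 0 ≤ p.2 := h2 p.2 hp2
  simp only [Function.comp, Prod.map]
  rw [show p.1 + 1 + 1 = (p.1 + 1) + 1 from rfl, slice_shift x xs (p.1 + 1) p.2 (by omega) hb]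

theorem pvBl_cons (l : String) (ls : List String) :
    pvBl (l :: ls) = (if l = "" then [(0 : Int)] else []) ++ (pvBl ls).map (· + 1) := by
  simp only [pvBl, PySem.List.enumerate_cons, List.filterMap_cons]
  have hsh := blanks_shift ls 0
  norm_num at hsh
  split_ifs <;> simp [hsh]

theorem pvBds_cons_blank (ls : List String) :
    pvBds ("" :: ls) = -1 :: (pvBds ls).map (· + 1) := by
  simp only [pvBds, pvBl_cons, List.map_append, List.map]
  push_cast
  norm_num

theorem pvBds_cons_nonblank (l : String) (ls : List String) (hl : l ≠ "") :
    pvBds (l :: ls) = -1 :: (pvBds ls).tail.map (· + 1) := by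
  simp only [pvBds, pvBl_cons, if_neg hl, List.nil_append]
  norm_num

theorem parse_alt_eq_pvSplit (ls : List String) : parse_alt ls = pvSplit ls := by
  induction ls with
  | nil => decide
  | cons l ls ih =>
    rw [parse_alt_def]
    by_cases hl : l = ""
    · subst hl
      rw [pvBds_cons_blank]
      rcases hq : (pvBds ls).map (· + 1) with _ | ⟨m0, m'⟩
      · simp [pvBds] at hq
      have hm0 : m0 = 0 := by
        simp only [pvBds] at hq
        have : m0 = -1 + 1 := (List.cons_eq_cons.mp hq).1.symm
        omega
      subst hm0
      have hsh := gps_shift "" ls (pvBds ls) (pvBds_mem ls) (pvBds_tail_mem ls)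
      rw [hq, List.tail_cons] at hsh
      rw [pvGps, List.tail_cons, List.zip_cons_cons, List.map_cons, hsh, ← parse_alt_def, ih]
      have hfirst : PySem.List.slice ("" :: ls) (some (-1 + 1)) (some 0) = ([] : List String) := by
        rw [show (-1 : Int) + 1 = 0 from rfl, PySem.List.slice_toNat _ le_rfl le_rfl]
        simp
      rw [hfirst]
      simp [pvSplit]
    · rw [pvBds_cons_nonblank l ls hl]
      rcases hq : (pvBds ls).tail with _ | ⟨h, t⟩
      · simp [pvBds] at hq
      have hh : 0 ≤ h := pvBds_tail_mem ls h (hq ▸ List.mem_cons_self ..)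
      have htmem : ∀ b ∈ t, 0 ≤ b := fun b hb => pvBds_tail_mem ls b (hq ▸ List.mem_cons_of_mem h hb)
      have hbds : pvBds ls = -1 :: h :: t := by
        rw [← hq]; simp [pvBds]
      -- parse_alt ls destructured into its first group and the rest
      have hsplit : parse_alt ls
          = (PySem.List.slice ls (some (-1 + 1)) (some h)).map pvRow
            :: ((h :: t).zip t).map (fun p => (PySem.List.slice ls (some (p.1 + 1)) (some p.2)).map pvRow) := by
        rw [parse_alt_def, pvGps, hbds, List.tail_cons, List.zip_cons_cons, List.map_cons]
      have hshift := gps_shift l ls (h :: t)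
        (by
          intro a ha
          rcases List.mem_cons.mp ha with h1 | h1
          · omega
          · have := htmem a h1; omega)
        (fun b hb => htmem b (by simpa using hb))
      rw [pvGps, List.tail_cons] at hshift
      simp only [List.map_cons, List.tail_cons] at hshift
      rw [pvGps, List.tail_cons]
      simp only [List.map_cons, List.zip_cons_cons, List.map_cons]
      rw [hshift]
      have hfirst : PySem.List.slice (l :: ls) (some (-1 + 1)) (some (h + 1))
          = l :: PySem.List.slice ls (some 0) (some h) := by
        rw [show (-1 : Int) + 1 = 0 from rfl]
        exact slice_head l ls h hh
      rw [hfirst]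
      rw [ih, show (-1 : Int) + 1 = 0 from rfl] at hsplit
      rcases hps : pvSplit ls with _ | ⟨g0, gs⟩
      · exact absurd hps (pvSplit_ne_nil ls)
      rw [hps] at hsplit
      obtain ⟨hg0, hgs⟩ := List.cons_eq_cons.mp hsplit
      simp only [pvSplit, if_neg hl, hps]
      simp [hg0, hgs]

-- ===== VERDICT (by name: the statement is the Claim_ definition above) =====
theorem parse_spec : Claim_equal_parse := by
  intro lines _
  unfold Spec_parse
  rw [parse_eq_pvSplit, parse_alt_eq_pvSplit]
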